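-- pv_equiv track=rewrite | github.com/Pamir-AI/esp32-agent-example | tools/led_matrix_viz.py | apply_flips
-- ===== SOURCE A (Python) =====
-- from typing import Iterable, List, Optional, Sequence, Tuple
--
-- RGB = Tuple[int, int, int]
--
-- def apply_flips(rgb: List[RGB], w: int, h: int, flip_x: bool, flip_y: bool) -> List[RGB]:
--     if not flip_x and not flip_y:
--         return rgb
--     out: List[RGB] = [(0, 0, 0)] * (w * h)
--     for y in range(h):
--         for x in range(w):
--             nx = (w - 1 - x) if flip_x else x
--             ny = (h - 1 - y) if flip_y else y
--             out[ny * w + nx] = rgb[y * w + x]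
--     return out
-- ===== SOURCE B (Python) =====
-- def apply_flips(rgb, w, h, flip_x, flip_y):
--     if not flip_x and not flip_y:
--         return rgb
--     rows = [rgb[y * w:(y + 1) * w] for y in range(h)]
--     if flip_x:
--         rows = [r[::-1] for r in rows]
--     if flip_y:
--         rows = rows[::-1]
--     return [px for r in rows for px in r]
-- ===== Notes on version B (the rewrite author's own statement) =====
-- stated objective: idiomatic
-- what changed: Replaces the preallocated flat output buffer with nested index-writes by a row decomposition: split the flat list into rows by slicing, reverse each row for flip_x, reverse the row order for flip_y, and flatten.
-- outside the precondition, e.g. on apply_flips([(1, 0, 0), (2, 0, 0), (3, 0, 0)], -2, 1, True, False): A returns [], B returns [(1, 0, 0)]; on apply_flips([(1, 0, 0)], -1, -1, True, False): A returns [(0, 0, 0)], B returns []; on apply_flips([(1, 0, 0)], 2, 1, True, False): A raises IndexError, B returns [(1, 0, 0)]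
import Mathlib
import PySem

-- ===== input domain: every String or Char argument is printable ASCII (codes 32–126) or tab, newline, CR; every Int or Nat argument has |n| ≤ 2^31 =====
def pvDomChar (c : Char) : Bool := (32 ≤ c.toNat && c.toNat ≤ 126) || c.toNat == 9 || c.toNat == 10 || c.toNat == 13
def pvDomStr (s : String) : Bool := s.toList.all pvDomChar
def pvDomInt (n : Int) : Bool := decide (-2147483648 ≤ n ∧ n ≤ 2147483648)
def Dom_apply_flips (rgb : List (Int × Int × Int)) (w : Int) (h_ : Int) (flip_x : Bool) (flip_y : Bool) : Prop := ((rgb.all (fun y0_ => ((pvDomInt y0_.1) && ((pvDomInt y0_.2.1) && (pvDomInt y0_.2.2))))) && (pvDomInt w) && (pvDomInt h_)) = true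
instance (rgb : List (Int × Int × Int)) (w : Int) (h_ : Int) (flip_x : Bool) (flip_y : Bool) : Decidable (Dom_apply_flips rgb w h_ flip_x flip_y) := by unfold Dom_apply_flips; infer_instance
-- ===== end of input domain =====

-- B replaces A's preallocated flat buffer filled by nested index-writes with a row
-- decomposition (slice into rows, reverse rows / row order, flatten); same cost, plainer code.

-- ===== PORT A =====
def apply_flips (rgb : List (Int × Int × Int)) (w : Int) (h_ : Int) (flip_x : Bool) (flip_y : Bool) : List (Int × Int × Int) :=
  if !flip_x && !flip_y then rgb
  else
    let out : List (Int × Int × Int) := List.replicate (w * h_).toNat (0, 0, 0)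
    (PySem.List.pyRange 0 h_ 1).foldl (fun out y =>
      (PySem.List.pyRange 0 w 1).foldl (fun out x =>
        let nx : Int := if flip_x then w - 1 - x else x
        let ny : Int := if flip_y then h_ - 1 - y else y
        -- out[ny*w+nx] = rgb[y*w+x] — inside Pre_ both indices are nonnegative and in
        -- range, so .toNat/List.set and pyGet?/getD are exact there
        out.set (ny * w + nx).toNat ((PySem.List.pyGet? rgb (y * w + x)).getD (0, 0, 0))) out) out

-- ===== PORT B =====
def apply_flips_alt (rgb : List (Int × Int × Int)) (w : Int) (h_ : Int) (flip_x : Bool) (flip_y : Bool) : List (Int × Int × Int) :=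
  if !flip_x && !flip_y then rgb
  else
    let rows := (PySem.List.pyRange 0 h_ 1).map
      (fun y => PySem.List.slice rgb (some (y * w)) (some ((y + 1) * w)))
    let rows := if flip_x then rows.map (fun r => r.reverse) else rows   -- r[::-1]
    let rows := if flip_y then rows.reverse else rows                    -- rows[::-1]
    rows.flatMap (fun r => r)                                            -- flatten

-- ===== PRECONDITION & SPEC =====
-- When a flip is requested, Pre_ excludes negative width (outside the natural domain:
-- B's negative slice bounds wrap Python-style and pick up pixels A's empty loops never
-- copy, and for w<0, h<0 A returns a padding buffer) and rgb shorter than w*h (A raises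
-- IndexError there). Without flips A returns rgb unchanged, and h ≤ 0 with w ≥ 0 gives [].
def Pre_apply_flips (rgb : List (Int × Int × Int)) (w : Int) (h_ : Int) (flip_x : Bool) (flip_y : Bool) : Prop :=
  (flip_x = false ∧ flip_y = false) ∨ (0 ≤ w ∧ h_ ≤ 0) ∨ (0 ≤ w ∧ 0 ≤ h_ ∧ w * h_ ≤ (rgb.length : Int))
instance (rgb : List (Int × Int × Int)) (w : Int) (h_ : Int) (flip_x : Bool) (flip_y : Bool) : Decidable (Pre_apply_flips rgb w h_ flip_x flip_y) := by unfold Pre_apply_flips; infer_instance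

def pvWitness_apply_flips : (List (Int × Int × Int)) × Int × Int × Bool × Bool :=
  ([(1, 2, 3), (4, 5, 6)], 2, 1, true, false)

def Spec_apply_flips (rgb : List (Int × Int × Int)) (w : Int) (h_ : Int) (flip_x : Bool) (flip_y : Bool) (out : List (Int × Int × Int)) : Prop := out = apply_flips_alt rgb w h_ flip_x flip_y
instance (rgb : List (Int × Int × Int)) (w : Int) (h_ : Int) (flip_x : Bool) (flip_y : Bool) (out : List (Int × Int × Int)) : Decidable (Spec_apply_flips rgb w h_ flip_x flip_y out) := by unfold Spec_apply_flips; infer_instance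

-- ===== CLAIM (what is proved, stated in full; the proofs are below) =====
def Claim_equal_apply_flips : Prop := ∀ (rgb : List (Int × Int × Int)) (w : Int) (h_ : Int) (flip_x : Bool) (flip_y : Bool), Dom_apply_flips rgb w h_ flip_x flip_y → Pre_apply_flips rgb w h_ flip_x flip_y → Spec_apply_flips rgb w h_ flip_x flip_y (apply_flips rgb w h_ flip_x flip_y)

-- ===== LEMMAS AND PROOFS =====

-- A's inner loop for one row (the inner lambda of the port, y fixed; let-bindings inlined)
def pvRow (rgb : List (Int × Int × Int)) (w : Int) (h_ : Int) (flip_x : Bool) (flip_y 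
: Bool) (out : List (Int × Int × Int)) (y : Int) : List (Int × Int × Int) :=
  (PySem.List.pyRange 0 w 1).foldl (fun out x =>
    out.set (((if flip_y then h_ - 1 - y else y) * w + (if flip_x then w - 1 - x else x)).toNat)
      ((PySem.List.pyGet? rgb (y * w + x)).getD (0, 0, 0))) out

-- B's list of rows, with the loop over range h already in ℕ form
def pvRows0 (rgb : List (Int × Int × Int)) (n m : ℕ) : List (List (Int × Int × Int)) :=
  (List.range m).map (fun (y : ℕ) =>
    PySem.List.slice rgb (some ((y : Int) * (n : Int))) (some (((y : Int) + 1) * (n : Int))))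

lemma pv_apply_flips_eq (rgb : List (Int × Int × Int)) (w h_ : Int) (fx fy : Bool)
    (h : (!fx && !fy) = false) :
    apply_flips rgb w h_ fx fy =
      (PySem.List.pyRange 0 h_ 1).foldl (pvRow rgb w h_ fx fy)
        (List.replicate (w * h_).toNat (0, 0, 0)) := by
  simp only [apply_flips, h, Bool.false_eq_true, if_false]
  rfl

-- length is preserved by any fold of set-writes
lemma pv_len_foldl_set {α ι : Type} (l : List ι) (f : ι → ℕ) (v : ι → α) (out : List α) :
    (l.foldl (fun o x => o.set (f x) (v x)) out).length = out.length := by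
  induction l generalizing out with
  | nil => rfl
  | cons a t ih => simp [List.foldl_cons, ih]

-- pointwise effect of ascending disjoint writes  out.set (b+0) … .set (b+n-1) …
lemma pv_foldl_set_asc {α : Type} (n b : ℕ) (g : ℕ → α) (out : List α) (j : ℕ) :
    ((List.range n).foldl (fun o x => o.set (b + x) (g x)) out)[j]? =
      if b ≤ j ∧ j < b + n then (if j < out.length then some (g (j - b)) else none)
      else out[j]? := by
  induction n with
  | zero => simp only [List.range_zero, List.foldl_nil]; rw [if_neg (by omega)]
  | succ k ih =>
    rw [List.range_succ, List.foldl_append, List.foldl_cons, List.foldl_nil,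
      List.getElem?_set, pv_len_foldl_set (List.range k) (fun x => b + x) g out, ih]
    by_cases h1 : b + k = j
    · have h3 : j - b = k := by omega
      rw [if_pos h1, if_pos (show b ≤ j ∧ j < b + (k + 1) by omega), h3, h1]
    · rw [if_neg h1]
      by_cases h2 : b ≤ j ∧ j < b + k
      · rw [if_pos h2, if_pos (show b ≤ j ∧ j < b + (k + 1) by omega)]
      · rw [if_neg h2, if_neg (show ¬(b ≤ j ∧ j < b + (k + 1)) by omega)]

-- pointwise effect of descending disjoint writes  out.set (c-0) … .set (c-(n-1)) …
lemma pv_foldl_set_desc {α : Type} (n c : ℕ) (g : ℕ → α) (out : List α) (j : ℕ)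
    (hn : n ≤ c + 1) :
    ((List.range n).foldl (fun o x => o.set (c - x) (g x)) out)[j]? =
      if c + 1 - n ≤ j ∧ j ≤ c then (if j < out.length then some (g (c - j)) else none)
      else out[j]? := by
  induction n with
  | zero => simp only [List.range_zero, List.foldl_nil]; rw [if_neg (by omega)]
  | succ k ih =>
    rw [List.range_succ, List.foldl_append, List.foldl_cons, List.foldl_nil,
      List.getElem?_set, pv_len_foldl_set (List.range k) (fun x => c - x) g out,
      ih (by omega)]
    by_cases h1 : c - k = j
    · have h3 : c - j = k := by omega
      rw [if_pos h1, if_pos (show c + 1 - (k + 1) ≤ j ∧ j ≤ c by omega), h3, h1]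
    · rw [if_neg h1]
      by_cases h2 : c + 1 - k ≤ j ∧ j ≤ c
      · rw [if_pos h2, if_pos (show c + 1 - (k + 1) ≤ j ∧ j ≤ c by omega)]
      · rw [if_neg h2, if_neg (show ¬(c + 1 - (k + 1) ≤ j ∧ j ≤ c) by omega)]

-- comparing a position q*n+r (r < n) with a band [k*n, k*n+n) identifies the row
lemma pv_row_eq (n q r k : ℕ) (hr : r < n) (h1 : k * n ≤ q * n + r) (h2 : q * n + r < k * n + n) :
    q = k := by
  rcases Nat.lt_trichotomy q k with h | h | h
  · have : q * n + n ≤ k * n := by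
      calc q * n + n = (q + 1) * n := by ring
      _ ≤ k * n := Nat.mul_le_mul_right n (Nat.succ_le_of_lt h)
    omega
  · exact h
  · have : k * n + n ≤ q * n := by
      calc k * n + n = (k + 1) * n := by ring
      _ ≤ q * n := Nat.mul_le_mul_right n (Nat.succ_le_of_lt h)
    omega

-- pointwise effect of pvRow (one row of A's double loop), y = ↑yv a valid row
lemma pv_row_getElem? (rgb : List (Int × Int × Int)) (n m : ℕ) (fx fy : Bool)
    (yv : ℕ) (hyv : yv < m) (out : List (Int × Int × Int)) (j : ℕ) :
    (pvRow rgb (n : Int) (m : Int) fx fy out (yv : Int))[j]? =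
      if (if fy then m - 1 - yv else yv) * n ≤ j ∧ j < (if fy then m - 1 - yv else yv) * n + n then
        (if j < out.length then
           some ((PySem.List.pyGet? rgb ((yv : Int) * (n : Int) +
             ((if fx then n - 1 - (j - (if fy then m - 1 - yv else yv) * n)
               else j - (if fy then m - 1 - yv else yv) * n : ℕ) : Int))).getD (0, 0, 0))
         else none)
      else out[j]? := by
  have hny : ((if fy then (m : Int) - 1 - (yv : Int) else (yv : Int)) : Int)
      = ((if fy then m - 1 - yv else yv : ℕ) : Int) := by
    rcases fy <;> simp <;> omega
  set ny : ℕ := (if fy then m - 1 - yv else yv : ℕ) with hnydef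
  rw [pvRow, PySem.List.pyRange_zero_natCast, List.foldl_map]
  rcases fx with _ | _
  · -- no row reversal: ascending writes at base ny*n
    simp only [Bool.false_eq_true, if_false]
    rw [PySem.List.foldl_congr_mem (List.range n)
      (fun o (x : ℕ) => o.set (((if fy = true then (m : Int) - 1 - (yv : Int) else (yv : Int)) * (n : Int) + (x : Int)).toNat)
        ((PySem.List.pyGet? rgb ((yv : Int) * (n : Int) + (x : Int))).getD (0, 0, 0)))
      (fun o (x : ℕ) => o.set (ny * n + x)
        ((PySem.List.pyGet? rgb ((yv : Int) * (n : Int) + (x : Int))).getD (0, 0, 0)))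
      out ?_]
    · exact pv_foldl_set_asc n (ny * n)
        (fun x => (PySem.List.pyGet? rgb ((yv : Int) * (n : Int) + (x : Int))).getD (0, 0, 0)) out j
    · intro acc x _
      have hidx : (((if fy = true then (m : Int) - 1 - (yv : Int) else (yv : Int)) * (n : Int) + (x : Int)).toNat) = ny * n + x := by
        rw [hny]
        have h4 : ((ny : Int) * (n : Int) + (x : Int)) = ((ny * n + x : ℕ) : Int) := by
          push_cast; ring
        rw [h4, Int.toNat_natCast]
      simp only [hidx]
  · -- row reversal: descending writes from  ny*n + n - 1  down
    simp only [if_true]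
    rw [PySem.List.foldl_congr_mem (List.range n)
      (fun o (x : ℕ) => o.set (((if fy = true then (m : Int) - 1 - (yv : Int) else (yv : Int)) * (n : Int) + ((n : Int) - 1 - (x : Int))).toNat)
        ((PySem.List.pyGet? rgb ((yv : Int) * (n : Int) + (x : Int))).getD (0, 0, 0)))
      (fun o (x : ℕ) => o.set ((ny * n + n - 1) - x)
        ((PySem.List.pyGet? rgb ((yv : Int) * (n : Int) + (x : Int))).getD (0, 0, 0)))
      out ?_]
    · rw [pv_foldl_set_desc n (ny * n + n - 1)
        (fun x => (PySem.List.pyGet? rgb ((yv : Int) * (n : Int) + (x : Int))).getD (0, 0, 0)) out j (by omega)]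
      by_cases hband : ny * n ≤ j ∧ j < ny * n + n
      · rw [if_pos (show ny * n + n - 1 + 1 - n ≤ j ∧ j ≤ ny * n + n - 1 by omega),
          if_pos hband, show (ny * n + n - 1) - j = n - 1 - (j - ny * n) by omega]
      · rw [if_neg (show ¬(ny * n + n - 1 + 1 - n ≤ j ∧ j ≤ ny * n + n - 1) by omega),
          if_neg hband]
    · intro acc x hx
      have hxn : x < n := List.mem_range.mp hx
      have hidx : (((if fy = true then (m : Int) - 1 - (yv : Int) else (yv : Int)) * (n : Int) + ((n : Int) - 1 - (x : Int))).toNat) = (ny * n + n - 1) - x := by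
        rw [hny]
        have h5 : ((ny : Int) * (n : Int)) = ((ny * n : ℕ) : Int) := by push_cast; ring
        rw [h5]
        omega
      simp only [hidx]

lemma pv_row_length (rgb : List (Int × Int × Int)) (w h_ : Int) (fx fy : Bool)
    (out : List (Int × Int × Int)) (y : Int) :
    (pvRow rgb w h_ fx fy out y).length = out.length := by
  rw [pvRow]
  generalize PySem.List.pyRange 0 w 1 = l
  induction l generalizing out with
  | nil => rfl
  | cons a t ih => rw [List.foldl_cons]; rw [ih]; simp

lemma pv_fold_rows_length (rgb : List (Int × Int × Int)) (n m : ℕ) (fx fy : Bool)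
    (k : ℕ) (out : List (Int × Int × Int)) :
    ((List.range k).foldl (fun o (y : ℕ) => pvRow rgb (n : Int) (m : Int) fx fy o (y : Int)) out).length = out.length := by
  induction k with
  | zero => rfl
  | succ k ih => rw [List.range_succ, List.foldl_append, List.foldl_cons, List.foldl_nil, pv_row_length, ih]

-- pointwise value of A's outer loop after k rows, at position q*n+r
lemma pv_outer (rgb : List (Int × Int × Int)) (n m : ℕ) (fx fy : Bool)
    (hn : 0 < n) (k : ℕ) (hk : k ≤ m)
    (out : List (Int × Int × Int)) (hout : out.length = n * m)
    (q r : ℕ) (hrn : r < n) (hqm : q < m) :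
    ((List.range k).foldl (fun o (y : ℕ) => pvRow rgb (n : Int) (m : Int) fx fy o (y : Int)) out)[q * n + r]? =
      if (if fy then m - k ≤ q else q < k) then
        some ((PySem.List.pyGet? rgb
          (((if fy then m - 1 - q else q : ℕ) : Int) * (n : Int) +
           ((if fx then n - 1 - r else r : ℕ) : Int))).getD (0, 0, 0))
      else out[q * n + r]? := by
  have hmn : n * m = m * n := Nat.mul_comm n m
  have hjlt : q * n + r < n * m := by
    have h1 : q * n + n ≤ m * n := by
      calc q * n + n = (q + 1) * n := by ring
      _ ≤ m * n := Nat.mul_le_mul_right n (Nat.succ_le_of_lt hqm)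
    omega
  rcases fy with _ | _
  · simp only [Bool.false_eq_true, if_false]
    induction k with
    | zero => rw [List.range_zero, List.foldl_nil, if_neg (Nat.not_lt_zero q)]
    | succ k ih =>
      rw [List.range_succ, List.foldl_append, List.foldl_cons, List.foldl_nil,
        pv_row_getElem? rgb n m fx false k (by omega) _ (q * n + r)]
      simp only [Bool.false_eq_true, if_false]
      have hflen : ((List.range k).foldl (fun o (y : ℕ) => pvRow rgb (n : Int) (m : Int) fx false o (y : Int)) out).length = n * m := by
        rw [pv_fold_rows_length, hout]
      by_cases hqk : q = k
      · subst hqk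
        rw [if_pos (show q * n ≤ q * n + r ∧ q * n + r < q * n + n by omega), hflen,
          if_pos hjlt, show q * n + r - q * n = r by omega,
          if_pos (show q < q + 1 by omega)]
      · have hband : ¬(k * n ≤ q * n + r ∧ q * n + r < k * n + n) :=
          fun hb => hqk (pv_row_eq n q r k hrn hb.1 hb.2)
        rw [if_neg hband, ih (by omega)]
        by_cases hcnd : q < k
        · rw [if_pos hcnd, if_pos (show q < k + 1 by omega)]
        · rw [if_neg hcnd, if_neg (show ¬ q < k + 1 by omega)]
  · simp only [if_true]
    induction k with
    | zero => rw [List.range_zero, List.foldl_nil, if_neg (show ¬ (m - 0 ≤ q) by omega)]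
    | succ k ih =>
      rw [List.range_succ, List.foldl_append, List.foldl_cons, List.foldl_nil,
        pv_row_getElem? rgb n m fx true k (by omega) _ (q * n + r)]
      simp only [if_true]
      have hflen : ((List.range k).foldl (fun o (y : ℕ) => pvRow rgb (n : Int) (m : Int) fx true o (y : Int)) out).length = n * m := by
        rw [pv_fold_rows_length, hout]
      by_cases hqk : q = m - 1 - k
      · subst hqk
        rw [if_pos (show (m - 1 - k) * n ≤ (m - 1 - k) * n + r ∧ (m - 1 - k) * n + r < (m - 1 - k) * n + n by omega),
          hflen, if_pos hjlt, show (m - 1 - k) * n + r - (m - 1 - k) * n = r by omega,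
          if_pos (show m - (k + 1) ≤ m - 1 - k by omega),
          show m - 1 - (m - 1 - k) = k by omega]
      · have hband : ¬((m - 1 - k) * n ≤ q * n + r ∧ q * n + r < (m - 1 - k) * n + n) :=
          fun hb => hqk (pv_row_eq n q r (m - 1 - k) hrn hb.1 hb.2)
        rw [if_neg hband, ih (by omega)]
        by_cases hcnd : m - k ≤ q
        · rw [if_pos hcnd, if_pos (show m - (k + 1) ≤ q by omega)]
        · rw [if_neg hcnd, if_neg (show ¬ (m - (k + 1) ≤ q) by omega)]

-- flatten of equal-length rows, pointwise
lemma pv_flat_getElem? {α : Type} (rs : List (List α)) (n : ℕ) (hn : 0 < n)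
    (h : ∀ r ∈ rs, r.length = n) (j : ℕ) :
    (rs.flatMap (fun r => r))[j]? = rs[j / n]?.bind (fun r => r[j % n]?) := by
  induction rs generalizing j with
  | nil => simp
  | cons r rs ih =>
    have hr : r.length = n := h r (by simp)
    rw [List.flatMap_cons, List.getElem?_append]
    by_cases hj : j < n
    · rw [if_pos (by omega), Nat.div_eq_of_lt hj, Nat.mod_eq_of_lt hj]
      simp
    · rw [if_neg (by omega), hr]
      obtain ⟨p, rfl⟩ : ∃ p, j = p + n := ⟨j - n, by omega⟩
      have e : p + n - n = p := by omega
      rw [e, Nat.add_div_right p hn, Nat.add_mod_right p n,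
        ih (fun r hr => h r (by simp [hr])) p]
      simp

-- B's row i: length and pointwise value
lemma pv_slice_row_len (rgb : List (Int × Int × Int)) (n m : ℕ) (i : ℕ) (hi : i < m)
    (hlen : n * m ≤ rgb.length) :
    (PySem.List.slice rgb (some ((i : Int) * (n : Int))) (some (((i : Int) + 1) * (n : Int)))).length = n := by
  have e1 : ((i : Int) * (n : Int)) = ((i * n : ℕ) : Int) := by push_cast; ring
  have e2 : (((i : Int) + 1) * (n : Int)) = (((i + 1) * n : ℕ) : Int) := by push_cast; ring
  rw [e1, e2, PySem.List.slice_natCast]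
  have e3 : (i + 1) * n - i * n = n := by
    have : (i + 1) * n = i * n + n := by ring
    omega
  have e4 : i * n + n ≤ rgb.length := by
    have h5 : (i + 1) * n ≤ m * n := Nat.mul_le_mul_right n (Nat.succ_le_of_lt hi)
    have h6 : (i + 1) * n = i * n + n := by ring
    have h7 : m * n = n * m := Nat.mul_comm _ _
    omega
  rw [e3]
  simp only [List.length_take, List.length_drop]
  omega

lemma pv_slice_row (rgb : List (Int × Int × Int)) (n m : ℕ) (i : ℕ) (hi : i < m)
    (hlen : n * m ≤ rgb.length) (x : ℕ) (hx : x < n) :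
    (PySem.List.slice rgb (some ((i : Int) * (n : Int))) (some (((i : Int) + 1) * (n : Int))))[x]? =
      rgb[i * n + x]? := by
  have e1 : ((i : Int) * (n : Int)) = ((i * n : ℕ) : Int) := by push_cast; ring
  have e2 : (((i : Int) + 1) * (n : Int)) = (((i + 1) * n : ℕ) : Int) := by push_cast; ring
  rw [e1, e2, PySem.List.slice_natCast]
  have e3 : (i + 1) * n - i * n = n := by
    have : (i + 1) * n = i * n + n := by ring
    omega
  rw [e3, List.getElem?_take, if_pos hx, List.getElem?_drop]

-- every position of the target grid is a valid index into rgb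
lemma pv_idx_lt (rgb : List (Int × Int × Int)) (n m : ℕ) (hlen : n * m ≤ rgb.length)
    (row col : ℕ) (hrow : row < m) (hcol : col < n) : row * n + col < rgb.length := by
  have h1 : row * n + n ≤ m * n := by
    calc row * n + n = (row + 1) * n := by ring
    _ ≤ m * n := Nat.mul_le_mul_right n (Nat.succ_le_of_lt hrow)
  have h2 : m * n = n * m := Nat.mul_comm _ _
  omega

-- A's final result, pointwise (flip case, position q*n+r of the grid)
lemma pv_A_getElem? (rgb : List (Int × Int × Int)) (n m : ℕ) (fx fy : Bool)
    (hflip : (!fx && !fy) = false) (hn : 0 < n)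
    (hlen : n * m ≤ rgb.length) (q r : ℕ) (hrn : r < n) (hqm : q < m) :
    (apply_flips rgb (n : Int) (m : Int) fx fy)[q * n + r]? =
      rgb[(if fy then m - 1 - q else q) * n + (if fx then n - 1 - r else r)]? := by
  have e0 : ((n : Int) * (m : Int)).toNat = n * m := by
    have : ((n : Int) * (m : Int)) = ((n * m : ℕ) : Int) := by push_cast; ring
    rw [this, Int.toNat_natCast]
  rw [pv_apply_flips_eq rgb _ _ fx fy hflip, e0, PySem.List.pyRange_zero_natCast,
    List.foldl_map,
    pv_outer rgb n m fx fy hn m le_rfl _ (by rw [List.length_replicate]) q r hrn hqm]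
  have hc : (if fy = true then m - m ≤ q else q < m) := by
    rcases fy with _ | _
    · simp only [Bool.false_eq_true, if_false]; exact hqm
    · simp only [if_true]; omega
  have hrowlt : (if fy = true then m - 1 - q else q) < m := by
    rcases fy with _ | _ <;> simp only [Bool.false_eq_true, if_false, if_true] <;> omega
  have hcollt : (if fx = true then n - 1 - r else r) < n := by
    rcases fx with _ | _ <;> simp only [Bool.false_eq_true, if_false, if_true] <;> omega
  have hK : (if fy = true then m - 1 - q else q) * n + (if fx = true then n - 1 - r else r) < rgb.length :=
    pv_idx_lt rgb n m hlen _ _ hrowlt hcollt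
  rw [if_pos hc,
    show (((if fy = true then m - 1 - q else q : ℕ) : Int) * (n : Int) +
        ((if fx = true then n - 1 - r else r : ℕ) : Int))
      = (((if fy = true then m - 1 - q else q) * n + (if fx = true then n - 1 - r else r) : ℕ) : Int) by push_cast; ring,
    PySem.List.pyGet?_natCast, List.getElem?_eq_getElem hK]
  simp

lemma pv_A_length (rgb : List (Int × Int × Int)) (n m : ℕ) (fx fy : Bool)
    (hflip : (!fx && !fy) = false) :
    (apply_flips rgb (n : Int) (m : Int) fx fy).length = n * m := by
  have e0 : ((n : Int) * (m : Int)).toNat = n * m := by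
    have : ((n : Int) * (m : Int)) = ((n * m : ℕ) : Int) := by push_cast; ring
    rw [this, Int.toNat_natCast]
  rw [pv_apply_flips_eq rgb _ _ fx fy hflip, e0, PySem.List.pyRange_zero_natCast,
    List.foldl_map, pv_fold_rows_length, List.length_replicate]

-- B unfolded to its rows pipeline over ℕ
lemma pv_rows0_eq (rgb : List (Int × Int × Int)) (n m : ℕ) :
    (PySem.List.pyRange 0 (m : Int) 1).map
      (fun y => PySem.List.slice rgb (some (y * (n : Int))) (some ((y + 1) * (n : Int)))) =
      pvRows0 rgb n m := by
  rw [PySem.List.pyRange_zero_natCast, List.map_map, pvRows0]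
  exact List.map_congr_left (fun a _ => rfl)

lemma pv_alt_eq (rgb : List (Int × Int × Int)) (n m : ℕ) (fx fy : Bool)
    (hflip : (!fx && !fy) = false) :
    apply_flips_alt rgb (n : Int) (m : Int) fx fy =
      (if fy then
        (if fx then (pvRows0 rgb n m).map (fun r => r.reverse) else pvRows0 rgb n m).reverse
       else
        (if fx then (pvRows0 rgb n m).map (fun r => r.reverse) else pvRows0 rgb n m)).flatMap
        (fun r => r) := by
  simp only [apply_flips_alt, hflip, Bool.false_eq_true, if_false]
  rw [pv_rows0_eq]

lemma pv_rows0_len (rgb : List (Int × Int × Int)) (n m : ℕ) :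
    (pvRows0 rgb n m).length = m := by
  simp [pvRows0]

lemma pv_rows0_mem_len (rgb : List (Int × Int × Int)) (n m : ℕ) (hlen : n * m ≤ rgb.length) :
    ∀ r ∈ pvRows0 rgb n m, r.length = n := by
  intro r hr
  obtain ⟨y, hy, rfl⟩ := List.mem_map.mp hr
  exact pv_slice_row_len rgb n m y (List.mem_range.mp hy) hlen

lemma pv_rows0_getElem? (rgb : List (Int × Int × Int)) (n m : ℕ) (i : ℕ) (hi : i < m) :
    (pvRows0 rgb n m)[i]? =
      some (PySem.List.slice rgb (some ((i : Int) * (n : Int))) (some (((i : Int) + 1) * (n : Int)))) := by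
  rw [pvRows0, List.getElem?_map, List.getElem?_range hi, Option.map_some]

lemma pv_sum_const (n : ℕ) (rs : List (List (Int × Int × Int))) (h : ∀ r ∈ rs, r.length = n) :
    (rs.map (fun r => r.length)).sum = rs.length * n := by
  induction rs with
  | nil => simp
  | cons r t ih =>
    rw [List.map_cons, List.sum_cons, h r (by simp), ih (fun r hr => h r (by simp [hr])),
      List.length_cons]
    ring

lemma pv_B_length (rgb : List (Int × Int × Int)) (n m : ℕ) (fx fy : Bool)
    (hflip : (!fx && !fy) = false) (hlen : n * m ≤ rgb.length) :
    (apply_flips_alt rgb (n : Int) (m : Int) fx fy).length = n * m := by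
  rw [pv_alt_eq rgb n m fx fy hflip, List.length_flatMap]
  have hmem := pv_rows0_mem_len rgb n m hlen
  have hmemrev : ∀ r ∈ (pvRows0 rgb n m).map (fun r => r.reverse), r.length = n := by
    intro r hr
    obtain ⟨r', hr', rfl⟩ := List.mem_map.mp hr
    rw [List.length_reverse]; exact hmem r' hr'
  rcases fy with _ | _ <;> rcases fx with _ | _ <;>
    simp only [Bool.false_eq_true, if_false, if_true]
  · rw [pv_sum_const n _ hmem, pv_rows0_len]; exact Nat.mul_comm m n
  · rw [pv_sum_const n _ hmemrev, List.length_map, pv_rows0_len]; exact Nat.mul_comm m n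
  · rw [pv_sum_const n _ (fun r hr => hmem r (List.mem_reverse.mp hr)), List.length_reverse,
      pv_rows0_len]
    exact Nat.mul_comm m n
  · rw [pv_sum_const n _ (fun r hr => hmemrev r (List.mem_reverse.mp hr)), List.length_reverse,
      List.length_map, pv_rows0_len]
    exact Nat.mul_comm m n

-- B's final result, pointwise (flip case, position q*n+r of the grid)
lemma pv_B_getElem? (rgb : List (Int × Int × Int)) (n m : ℕ) (fx fy : Bool)
    (hflip : (!fx && !fy) = false) (hn : 0 < n)
    (hlen : n * m ≤ rgb.length) (q r : ℕ) (hrn : r < n) (hqm : q < m) :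
    (apply_flips_alt rgb (n : Int) (m : Int) fx fy)[q * n + r]? =
      rgb[(if fy then m - 1 - q else q) * n + (if fx then n - 1 - r else r)]? := by
  have hdiv : (q * n + r) / n = q := by
    rw [Nat.add_comm, Nat.add_mul_div_right r q hn, Nat.div_eq_of_lt hrn, Nat.zero_add]
  have hmod : (q * n + r) % n = r := by
    rw [Nat.add_comm, Nat.add_mul_mod_self_right, Nat.mod_eq_of_lt hrn]
  have hmem := pv_rows0_mem_len rgb n m hlen
  have hmemrev : ∀ r ∈ (pvRows0 rgb n m).map (fun r => r.reverse), r.length = n := by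
    intro r hr
    obtain ⟨r', hr', rfl⟩ := List.mem_map.mp hr
    rw [List.length_reverse]; exact hmem r' hr'
  rw [pv_alt_eq rgb n m fx fy hflip]
  rcases fy with _ | _ <;> rcases fx with _ | _ <;>
    simp only [Bool.false_eq_true, if_false, if_true]
  · -- fy = false, fx = false
    rw [pv_flat_getElem? _ n hn hmem _, hdiv, hmod, pv_rows0_getElem? rgb n m _ hqm,
      Option.bind_some, pv_slice_row rgb n m _ hqm hlen _ hrn]
  · -- fy = false, fx = true
    rw [pv_flat_getElem? _ n hn hmemrev _, hdiv, hmod, List.getElem?_map,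
      pv_rows0_getElem? rgb n m _ hqm]
    simp only [Option.map_some, Option.bind_some]
    rw [List.getElem?_reverse (by rw [pv_slice_row_len rgb n m _ hqm hlen]; exact hrn),
      pv_slice_row_len rgb n m _ hqm hlen,
      pv_slice_row rgb n m _ hqm hlen _ (by omega)]
  · -- fy = true, fx = false
    rw [pv_flat_getElem? _ n hn (fun r hr => hmem r (List.mem_reverse.mp hr)) _, hdiv, hmod,
      List.getElem?_reverse (by rw [pv_rows0_len]; exact hqm), pv_rows0_len,
      pv_rows0_getElem? rgb n m _ (by omega), Option.bind_some,
      pv_slice_row rgb n m _ (by omega) hlen _ hrn]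
  · -- fy = true, fx = true
    rw [pv_flat_getElem? _ n hn (fun r hr => hmemrev r (List.mem_reverse.mp hr)) _, hdiv, hmod,
      List.getElem?_reverse (by rw [List.length_map, pv_rows0_len]; exact hqm),
      List.length_map, pv_rows0_len, List.getElem?_map,
      pv_rows0_getElem? rgb n m _ (by omega)]
    simp only [Option.map_some, Option.bind_some]
    rw [List.getElem?_reverse (by rw [pv_slice_row_len rgb n m _ (by omega) hlen]; exact hrn),
      pv_slice_row_len rgb n m _ (by omega) hlen,
      pv_slice_row rgb n m _ (by omega) hlen _ (by omega)]

-- ===== VERDICT (by name: the statement is the Claim_ definition above) =====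
theorem apply_flips_spec : Claim_equal_apply_flips := by
  intro rgb w h_ fx fy _ hpre
  unfold Spec_apply_flips
  by_cases hflip : (!fx && !fy) = true
  · simp only [apply_flips, apply_flips_alt, hflip, if_true]
  · rw [Bool.not_eq_true] at hflip
    have hpre' : (0 ≤ w ∧ h_ ≤ 0) ∨ (0 ≤ w ∧ 0 ≤ h_ ∧ w * h_ ≤ (rgb.length : Int)) := by
      rcases hpre with ⟨hx, hy⟩ | h | h
      · exfalso; rw [hx, hy] at hflip; simp at hflip
      · exact Or.inl h
      · exact Or.inr h
    rcases hpre' with ⟨hw, hh0⟩ | ⟨hw, hh, hlenI⟩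
    · -- h ≤ 0 with a flip: A's loop is empty over an empty buffer, B has no rows
      have hr : PySem.List.pyRange 0 h_ 1 = [] := PySem.List.pyRange_one_eq_nil (by omega)
      have hwh : w * h_ ≤ 0 := mul_nonpos_of_nonneg_of_nonpos hw hh0
      have ht : (w * h_).toNat = 0 := by omega
      simp [apply_flips, apply_flips_alt, hflip, hr, ht]
    · obtain ⟨n, rfl⟩ : ∃ n : ℕ, w = (n : Int) := ⟨w.toNat, (Int.toNat_of_nonneg hw).symm⟩
      obtain ⟨m, rfl⟩ : ∃ m : ℕ, h_ = (m : Int) := ⟨h_.toNat, (Int.toNat_of_nonneg hh).symm⟩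
      have hlen : n * m ≤ rgb.length := by exact_mod_cast hlenI
      apply List.ext_getElem?
      intro j
      by_cases hj : j < n * m
      · have hn : 0 < n := by
          rcases Nat.eq_zero_or_pos n with h0 | h0
          · subst h0; simp at hj
          · exact h0
        obtain ⟨q, r, hrn, hqm, rfl⟩ : ∃ q r, r < n ∧ q < m ∧ j = q * n + r := by
          refine ⟨j / n, j % n, Nat.mod_lt _ hn, ?_, ?_⟩
          · rw [Nat.div_lt_iff_lt_mul hn]
            have := Nat.mul_comm n m
            omega
          · have h1 := Nat.div_add_mod j n
            have h2 : n * (j / n) = (j / n) * n := Nat.mul_comm _ _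
            omega
        rw [pv_A_getElem? rgb n m fx fy hflip hn hlen q r hrn hqm,
          pv_B_getElem? rgb n m fx fy hflip hn hlen q r hrn hqm]
      · rw [List.getElem?_eq_none (by rw [pv_A_length rgb n m fx fy hflip]; omega),
          List.getElem?_eq_none (by rw [pv_B_length rgb n m fx fy hflip hlen]; omega)]
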